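-- pv_equiv track=rewrite | github.com/Nghia03092004/nghia03092004.github.io | project_euler_unified/problem_840/solution.py | sum_esp_brute
-- ===== SOURCE A (Python) =====
-- def sum_esp_brute(xs):
--     """Enumerate all subsets."""
--     from itertools import combinations
--     n = len(xs)
--     total = 0
--     for k in range(1, n + 1):
--         for subset in combinations(xs, k):
--             prod = 1
--             for v in subset:
--                 prod *= v
--             total += prod
--     return total
-- ===== SOURCE B (Python) =====
-- def sum_esp_brute(xs):
--     """Sum of products over all nonempty subsets = prod(1+x) - 1 (elementary symmetric identity)."""
--     prod = 1
--     for x in xs: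
--         prod *= 1 + x
--     return prod - 1
-- ===== Notes on version B (the rewrite author's own statement) =====
-- stated objective: faster
-- what changed: Replaced the exponential enumeration of all nonempty subsets (itertools.combinations for every size k) by the closed form prod(1+x_i) - 1, computed in one linear pass.
import Mathlib
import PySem

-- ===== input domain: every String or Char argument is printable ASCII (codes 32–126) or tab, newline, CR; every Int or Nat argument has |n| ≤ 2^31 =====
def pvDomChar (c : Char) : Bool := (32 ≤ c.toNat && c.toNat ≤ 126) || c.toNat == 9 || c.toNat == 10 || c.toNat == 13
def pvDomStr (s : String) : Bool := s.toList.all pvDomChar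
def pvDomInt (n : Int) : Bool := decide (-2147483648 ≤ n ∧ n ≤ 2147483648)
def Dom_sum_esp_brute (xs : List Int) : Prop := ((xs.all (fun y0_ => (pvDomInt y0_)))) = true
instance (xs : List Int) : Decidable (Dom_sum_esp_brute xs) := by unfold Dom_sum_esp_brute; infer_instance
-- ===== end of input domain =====

-- B replaces the exponential subset enumeration by the closed form prod(1+x_i) - 1 (objective: faster, asymptotic).


-- ===== PORT A =====
-- literal port: for k in range(1, n+1): for subset in combinations(xs, k): prod-loop; total += prod
def sum_esp_brute (xs : List Int) : Int :=
  let n : Int := xs.length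
  (PySem.List.pyRange 1 (n + 1) 1).foldl (fun total k =>
    (PySem.List.combinations xs k.toNat).foldl (fun total subset =>
      total + subset.foldl (fun prod v => prod * v) 1) total) 0

-- ===== PORT B =====
-- literal port of Source B: prod = 1; for x in xs: prod *= 1 + x; return prod - 1
def sum_esp_brute_alt (xs : List Int) : Int :=
  xs.foldl (fun prod x => prod * (1 + x)) 1 - 1

-- ===== PRECONDITION & SPEC =====
def Spec_sum_esp_brute (xs : List Int) (out : Int) : Prop := out = sum_esp_brute_alt xs
instance (xs : List Int) (out : Int) : Decidable (Spec_sum_esp_brute xs out) := by unfold Spec_sum_esp_brute; infer_instance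

-- ===== CLAIM (what is proved, stated in full; the proofs are below) =====
def Claim_equal_sum_esp_brute : Prop := ∀ (xs : List Int), Dom_sum_esp_brute xs → Spec_sum_esp_brute xs (sum_esp_brute xs)

-- ===== LEMMAS AND PROOFS =====

-- S xs k = sum of products of all k-element combinations of xs
def pvS (xs : List Int) (k : Nat) : Int := ((PySem.List.combinations xs k).map List.prod).sum

lemma pvS_zero (xs : List Int) : pvS xs 0 = 1 := by
  simp [pvS, PySem.List.combinations_zero]

lemma pvS_cons_succ (x : Int) (xs : List Int) (k : Nat) :
    pvS (x :: xs) (k + 1) = x * pvS xs k + pvS xs (k + 1) := by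
  simp [pvS, PySem.List.combinations_cons_succ, List.map_map, Function.comp_def,
    List.sum_map_mul_left]

lemma pvS_overflow (xs : List Int) : pvS xs (xs.length + 1) = 0 := by
  rw [pvS, PySem.List.combinations_eq_nil_of_length_lt xs (by omega)]
  simp

-- T xs = sum over all combination sizes 0..len(xs)
def pvT (xs : List Int) : Int := ∑ k ∈ Finset.range (xs.length + 1), pvS xs k

lemma pvT_eq_prod (xs : List Int) : pvT xs = (xs.map (fun x => 1 + x)).prod := by
  induction xs with
  | nil => simp [pvT, pvS_zero]
  | cons x xs ih =>
    have h2 : ∑ k ∈ Finset.range (xs.length + 1), pvS xs (k + 1) = pvT xs - 1 := by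
      have h := Finset.sum_range_succ' (pvS xs) (xs.length + 1)
      rw [Finset.sum_range_succ, pvS_overflow, pvS_zero] at h
      simp only [pvT]
      omega
    have h1 : pvT (x :: xs) = 1 + ∑ k ∈ Finset.range (xs.length + 1), pvS (x :: xs) (k + 1) := by
      have h := Finset.sum_range_succ' (pvS (x :: xs)) (xs.length + 1)
      rw [pvS_zero] at h
      simp only [pvT, List.length_cons]
      omega
    rw [h1]
    simp only [pvS_cons_succ, Finset.sum_add_distrib, ← Finset.mul_sum]
    rw [h2]
    have h3 : ∑ k ∈ Finset.range (xs.length + 1), pvS xs k = pvT xs := rfl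
    rw [h3, ih, List.map_cons, List.prod_cons]
    ring

lemma foldl_mul_eq_prod (c : List Int) : c.foldl (fun p v => p * v) 1 = c.prod := by
  rw [List.prod_eq_foldl]

lemma range_map_sum_eq (n : Nat) (f : Nat → Int) :
    ((List.range n).map f).sum = ∑ i ∈ Finset.range n, f i := by
  exact Int.neg_inj.mp rfl

lemma alt_foldl_eq_prod (xs : List Int) :
    xs.foldl (fun prod x => prod * (1 + x)) 1 = (xs.map (fun x => 1 + x)).prod := by
  rw [List.prod_eq_foldl, ← List.foldl_map]

-- ===== VERDICT (by name: the statement is the Claim_ definition above) =====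
theorem sum_esp_brute_spec : Claim_equal_sum_esp_brute := by
  intro xs _
  unfold Spec_sum_esp_brute sum_esp_brute sum_esp_brute_alt
  simp only []
  rw [PySem.List.foldl_congr_mem _ _
      (fun (total : Int) (k : Int) => total + pvS xs k.toNat) _
      (by
        intro a k _
        rw [PySem.List.foldl_add]
        simp only [pvS]
        congr 2
        exact List.map_congr_left (fun c _ => foldl_mul_eq_prod c))]
  rw [PySem.List.foldl_add, PySem.List.pyRange_one]
  have hlen : ((xs.length : Int) + 1 - 1).toNat = xs.length := by omega
  rw [hlen, List.map_map]
  have hmap : (List.range xs.length).map ((fun k : Int => pvS xs k.toNat) ∘ fun j : Nat => (1 : Int) + j)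
      = (List.range xs.length).map (fun j => pvS xs (j + 1)) := by
    apply List.map_congr_left
    intro j _
    have : ((1 : Int) + (j : Int)).toNat = j + 1 := by omega
    simp [Function.comp, this]
  rw [hmap, range_map_sum_eq]
  have h2 : ∑ j ∈ Finset.range xs.length, pvS xs (j + 1) = pvT xs - 1 := by
    have h := Finset.sum_range_succ' (pvS xs) xs.length
    rw [pvS_zero] at h
    simp only [pvT]
    omega
  rw [alt_foldl_eq_prod, ← pvT_eq_prod]
  omega
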